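-- pv_equiv track=rewrite | github.com/maria-pugacheva/LeetCode | src/python/_01_easy/_2144_minimum-cost-of-buying-candies-with-discount.py | solution
-- ===== SOURCE A (Python) =====
-- from typing import List
--
-- def solution(cost: List[int]) -> int:
--     """A shop is selling candies at a discount. For every two candies
--     sold, the shop gives a third candy for free. The customer can choose
--     any candy to take away for free as long as the cost of the chosen
--     candy is less than or equal to the minimum cost of the two candies
--     bought. Given a 0-indexed integer array cost, where cost[i] denotes
--     the cost of the ith candy, return the minimum cost of buying all the
--     candies.
--
--     Examples:
--         >>> solution([5, 5])
--         10
--         >>> solution([1, 2, 3])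
--         5
--         >>> solution([6, 5, 7, 9, 2, 2])
--         23
--     """
--     cost.sort()
--     res = cnt = 0
--     for i in range(len(cost) - 1, -1, -1):
--         if cnt < 2:
--             res += cost[i]
--             cnt += 1
--         else:
--             cnt = 0
--     return res
-- ===== SOURCE B (Python) =====
-- from typing import List
--
-- def solution(cost: List[int]) -> int:
--     cost.sort()
--     c = cost[::-1]
--     res = 0
--     i = 0
--     while i < len(c):
--         res += sum(c[i:i + 2])
--         i += 3
--     return res
-- ===== Notes on version B (the rewrite author's own statement) =====
-- stated objective: alternative
-- what changed: Instead of A's index countdown over the whole sorted array with a pay-two/skip-one counter, B reverses the sorted list and walks it chunk-wise with a while loop whose index advances by 3, paying for the two-element slice at the head of each chunk.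
import Mathlib
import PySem

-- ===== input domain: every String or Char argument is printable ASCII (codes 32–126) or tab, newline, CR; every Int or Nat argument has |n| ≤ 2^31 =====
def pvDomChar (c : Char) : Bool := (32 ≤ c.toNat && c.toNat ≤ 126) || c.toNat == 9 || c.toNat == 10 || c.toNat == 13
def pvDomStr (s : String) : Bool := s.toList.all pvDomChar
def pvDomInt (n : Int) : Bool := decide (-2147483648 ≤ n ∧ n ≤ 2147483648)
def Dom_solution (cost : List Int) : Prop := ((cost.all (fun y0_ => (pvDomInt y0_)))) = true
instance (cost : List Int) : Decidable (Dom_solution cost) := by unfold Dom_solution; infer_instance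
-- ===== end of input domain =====

-- B reverses the sorted list and walks it chunk-wise with a while loop over an index
-- advancing by 3, paying for the two-element slice at the head of each chunk, instead of A's index countdown with a
-- pay-two/skip-one counter. Same cost class, different decomposition. Python's
-- cost.sort() mutates the argument in both A and B; the theorems are about the RETURN value.

-- ===== PORT A =====
def solution (cost : List Int) : Int :=
  let c := PySem.List.sorted cost (fun x => x) false
  let r := (PySem.List.pyRange ((c.length : Int) - 1) (-1) (-1)).foldl
    (fun (st : Int × Int) i =>
      if st.2 < 2 then (st.1 + PySem.List.pyGetD c i 0, st.2 + 1) else (st.1, 0))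
    (0, 0)
  r.1

-- ===== PORT B =====
-- the 'while i < len(c):' loop of Source B: res += sum(c[i:i+2]); i += 3
def payLoop (res : Int) (c : List Int) (i : Int) : Int :=
  if i < (c.length : Int) then
    payLoop (res + (PySem.List.slice c (some i) (some (i + 2))).sum) c (i + 3)
  else res
termination_by ((c.length : Int) - i).toNat
decreasing_by omega

def solution_alt (cost : List Int) : Int :=
  let _ := PySem.List.sorted cost (fun x => x) false  -- cost.sort() (in-place; return value unused here)
  let c := (PySem.List.sorted cost (fun x => x) false).reverse  -- c = cost[::-1] (PySem.List.slice?_none_none_neg_one)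
  payLoop 0 c 0

-- ===== PRECONDITION & SPEC =====
def Spec_solution (cost : List Int) (out : Int) : Prop := out = solution_alt cost
instance (cost : List Int) (out : Int) : Decidable (Spec_solution cost out) := by unfold Spec_solution; infer_instance

-- ===== CLAIM (what is proved, stated in full; the proofs are below) =====
def Claim_equal_solution : Prop := ∀ (cost : List Int), Dom_solution cost → Spec_solution cost (solution cost)

-- ===== LEMMAS AND PROOFS =====

-- A's loop body, on the already-fetched element.
def payStep : Int × Int → Int → Int × Int :=
  fun st x => if st.2 < 2 then (st.1 + x, st.2 + 1) else (st.1, 0)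

-- Sum of every third element (positions 2, 5, 8, …): the candies A's counter skips.
def skip3 : List Int → Int
  | _ :: _ :: z :: t => z + skip3 t
  | _ => 0

theorem payFold_shift : ∀ (l : List Int) (r c : Int),
    l.foldl payStep (r, c) = ((l.foldl payStep (0, c)).1 + r, (l.foldl payStep (0, c)).2)
  | [], r, c => by simp
  | x :: t, r, c => by
      simp only [List.foldl_cons, payStep]
      by_cases h : c < 2
      · simp only [if_pos h]
        rw [payFold_shift t (r + x) (c + 1), payFold_shift t (0 + x) (c + 1)]
        exact Prod.ext (by ring) rfl
      · simp only [if_neg h]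
        rw [payFold_shift t r 0, payFold_shift t 0 0]

theorem pay_eq : ∀ (l : List Int), (l.foldl payStep (0, 0)).1 = l.sum - skip3 l
  | [] => by simp [skip3]
  | [x] => by simp [payStep, skip3]
  | [x, y] => by simp [payStep, skip3]
  | x :: y :: z :: t => by
      have ih := pay_eq t
      simp only [List.foldl_cons, payStep]
      norm_num
      rw [payFold_shift t (x + y) 0]
      simp only [skip3]
      omega

-- Peeling one pay-two/skip-one chunk off the front.
theorem chunk_id : ∀ (l : List Int),
    l.sum - skip3 l = (l.take 2).sum + (l.drop 3).sum - skip3 (l.drop 3)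
  | [] => by simp [skip3]
  | [x] => by simp [skip3]
  | [x, y] => by simp [skip3]
  | x :: y :: z :: t => by simp [skip3]; ring

theorem payLoop_drop (c : List Int) (i r : Int) (hi : 0 ≤ i) :
    payLoop r c i = r + (c.drop i.toNat).sum - skip3 (c.drop i.toNat) := by
  unfold payLoop
  by_cases h : i < (c.length : Int)
  · rw [if_pos h, payLoop_drop c (i + 3) _ (by omega),
        PySem.List.slice_toNat c hi (by omega : (0:Int) ≤ i + 2),
        show (i + 2).toNat - i.toNat = 2 from by omega,
        show (i + 3).toNat = 3 + i.toNat from by omega]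
    rw [show (3 + i.toNat) = i.toNat + 3 from by omega]
    have hch := chunk_id (c.drop i.toNat)
    rw [List.drop_drop] at hch
    omega
  · rw [if_neg h]
    have hd : c.drop i.toNat = [] := List.drop_eq_nil_of_le (by omega)
    simp [hd, skip3]
termination_by ((c.length : Int) - i).toNat
decreasing_by omega

theorem ports_agree (cost : List Int) : solution cost = solution_alt cost := by
  simp only [solution, solution_alt]
  set c := PySem.List.sorted cost (fun x => x) false with hc
  have hA : (PySem.List.pyRange ((c.length : Int) - 1) (-1) (-1)).foldl
      (fun (st : Int × Int) i =>
        if st.2 < 2 then (st.1 + PySem.List.pyGetD c i 0, st.2 + 1) else (st.1, 0))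
      (0, 0)
      = c.reverse.foldl payStep (0, 0) := by
    rw [PySem.List.pyRange_neg_one_eq_reverse]
    rw [show ((-1 : Int) + 1) = 0 from by norm_num,
        show ((c.length : Int) - 1 + 1) = (c.length : Int) from by ring]
    have hbody : (fun (st : Int × Int) i =>
        if st.2 < 2 then (st.1 + PySem.List.pyGetD c i 0, st.2 + 1) else (st.1, 0))
        = (fun st i => payStep st (PySem.List.pyGetD c i 0)) := rfl
    rw [hbody, ← List.foldl_map, List.map_reverse,
        PySem.List.map_pyGetD_pyRange_zero']
  rw [hA, pay_eq, payLoop_drop _ _ _ (by norm_num)]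
  simp

-- ===== VERDICT (by name: the statement is the Claim_ definition above) =====
theorem solution_spec : Claim_equal_solution := by
  intro cost _
  unfold Spec_solution
  exact ports_agree cost
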